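-- pv_equiv track=rewrite | github.com/ioaksenenko/neural_networks | identifier/datamaker/type_3/main.py | single_choice_question_generate
-- ===== SOURCE A (Python) =====
-- def single_choice_question_generate(n=1, m=1):
--     inputs = []
--     outputs = []
--     for i in range(n):
--         input = '<p>T</p>'
--         for j in range(n):
--             input += '<p>' + ('<s>' if i != j else '') + str(j+1) + '.T;' + ('</s>' if i != j else '') + '</p>'
--         inputs.append(input)
--         outputs.append([1, 0, 0, 0, 0, 0, 0])
--     return inputs, outputs
-- ===== SOURCE B (Python) =====
-- def single_choice_question_generate(n=1, m=1):
--     seg = ['<p><s>' + str(j + 1) + '.T;</s></p>' for j in range(n)]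
--     inputs = []
--     for i in range(n):
--         row = seg.copy()
--         row[i] = '<p>' + str(i + 1) + '.T;</p>'
--         inputs.append('<p>T</p>' + ''.join(row))
--     outputs = [[1, 0, 0, 0, 0, 0, 0] for _ in range(n)]
--     return inputs, outputs
-- ===== Notes on version B (the rewrite author's own statement) =====
-- stated objective: alternative
-- what changed: Instead of rebuilding every segment with a per-position conditional in an O(n^2) double loop of string concatenations, B precomputes the n wrapped segment strings once, and each row is produced by copying that table, overriding the single diagonal entry with its unwrapped form, and joining; the label list is a comprehension.
import Mathlib
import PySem

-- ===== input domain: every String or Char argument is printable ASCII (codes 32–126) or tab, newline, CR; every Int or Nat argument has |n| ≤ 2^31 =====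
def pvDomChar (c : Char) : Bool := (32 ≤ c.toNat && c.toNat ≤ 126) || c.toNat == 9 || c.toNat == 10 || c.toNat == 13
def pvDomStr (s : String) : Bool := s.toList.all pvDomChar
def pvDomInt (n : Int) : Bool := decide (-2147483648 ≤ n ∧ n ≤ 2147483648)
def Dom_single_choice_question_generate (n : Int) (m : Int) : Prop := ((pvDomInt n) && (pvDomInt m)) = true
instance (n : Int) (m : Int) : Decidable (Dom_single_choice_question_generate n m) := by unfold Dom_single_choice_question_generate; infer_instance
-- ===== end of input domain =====

-- B builds each row from a precomputed table of wrapped segments with one diagonal override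
-- instead of A's per-position conditional rebuild; same return value, similar cost ("alternative").

-- ===== PORT A =====
def single_choice_question_generate (n : Int) (m : Int) : List String × List (List Int) :=
  (PySem.List.pyRange 0 n 1).foldl
    (fun (acc : List String × List (List Int)) i =>
      let input : String :=
        (PySem.List.pyRange 0 n 1).foldl
          (fun s j =>
            s ++ ("<p>" ++ (if i ≠ j then "<s>" else "") ++ PySem.Int.toStr (j + 1) ++ ".T;" ++
              (if i ≠ j then "</s>" else "") ++ "</p>"))
          "<p>T</p>"
      (acc.1 ++ [input], acc.2 ++ [[1, 0, 0, 0, 0, 0, 0]]))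
    ([], [])

-- ===== PORT B =====
def single_choice_question_generate_alt (n : Int) (m : Int) : List String × List (List Int) :=
  let seg := (PySem.List.pyRange 0 n 1).map
    (fun j => "<p><s>" ++ PySem.Int.toStr (j + 1) ++ ".T;</s></p>")
  let inputs := (PySem.List.pyRange 0 n 1).map
    (fun i =>
      "<p>T</p>" ++ PySem.Str.join ""
        (PySem.List.pySetD seg i ("<p>" ++ PySem.Int.toStr (i + 1) ++ ".T;</p>")))
  let outputs := (PySem.List.pyRange 0 n 1).map (fun _ => [1, 0, 0, 0, 0, 0, 0])
  (inputs, outputs)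

-- ===== PRECONDITION & SPEC =====
def Spec_single_choice_question_generate (n : Int) (m : Int) (out : List String × List (List Int)) : Prop := out = single_choice_question_generate_alt n m
instance (n : Int) (m : Int) (out : List String × List (List Int)) : Decidable (Spec_single_choice_question_generate n m out) := by unfold Spec_single_choice_question_generate; infer_instance

-- ===== CLAIM (what is proved, stated in full; the proofs are below) =====
def Claim_equal_single_choice_question_generate : Prop := ∀ (n : Int) (m : Int), Dom_single_choice_question_generate n m → Spec_single_choice_question_generate n m (single_choice_question_generate n m)

-- ===== LEMMAS AND PROOFS =====

theorem pvFlattenIntersperseNil (l : List (List Char)) :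
    (List.intersperse ([] : List Char) l).flatten = l.flatten := by
  induction l with
  | nil => rfl
  | cons a t ih =>
    cases t with
    | nil => rfl
    | cons b t' => simpa using ih

theorem pvJoinEmptyNil : PySem.Str.join "" ([] : List String) = "" := by
  simp [PySem.Str.join, PySem.Chars.join, List.intercalate]

theorem pvJoinEmptyCons (p : String) (ps : List String) :
    PySem.Str.join "" (p :: ps) = p ++ PySem.Str.join "" ps := by
  simp [PySem.Str.join, PySem.Chars.join, List.intercalate, pvFlattenIntersperseNil]

theorem pvFoldlStr (F : Int → String) :
    ∀ (l : List Int) (s : String),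
      l.foldl (fun acc j => acc ++ F j) s = s ++ PySem.Str.join "" (l.map F) := by
  intro l
  induction l with
  | nil => intro s; simp [pvJoinEmptyNil]
  | cons x t ih =>
    intro s
    simp [List.foldl_cons, ih, pvJoinEmptyCons, String.append_assoc]

theorem pvFoldlProd (F : Int → String) (G : Int → List Int) :
    ∀ (l : List Int) (as : List String) (bs : List (List Int)),
      l.foldl (fun (acc : List String × List (List Int)) i =>
          (acc.1 ++ [F i], acc.2 ++ [G i])) (as, bs)
        = (as ++ l.map F, bs ++ l.map G) := by
  intro l
  induction l with
  | nil => intro as bs; simp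
  | cons x t ih => intro as bs; simp [List.foldl_cons, ih]

theorem pvSetMap (n i : Int) (hi0 : 0 ≤ i)
    (segf : Int → String) (u : String) :
    PySem.List.pySetD ((PySem.List.pyRange 0 n 1).map segf) i u
      = (PySem.List.pyRange 0 n 1).map (fun j => if i = j then u else segf j) := by
  rw [PySem.List.pySetD_of_nonneg]
  · apply List.ext_getElem
    · simp
    · intro k h1 h2
      simp only [List.getElem_set, List.getElem_map, PySem.List.getElem_pyRange_one]
      have hk : (k : Int) < n := by
        have := h2
        simp [PySem.List.length_pyRange_one] at this
        omega
      by_cases hki : i.toNat = k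
      · have hik : i = 0 + (k : Int) := by omega
        simp [hki, ← hik]
      · have hik : i ≠ (k : Int) := by omega
        simp [hki, hik]
  · exact hi0

-- ===== VERDICT (by name: the statement is the Claim_ definition above) =====
theorem single_choice_question_generate_spec : Claim_equal_single_choice_question_generate := by
  intro n m _
  unfold Spec_single_choice_question_generate single_choice_question_generate
    single_choice_question_generate_alt
  rw [pvFoldlProd]
  refine Prod.ext ?_ (by simp)
  simp only [List.nil_append]
  apply List.map_congr_left
  intro i hi
  have hmem := (PySem.List.mem_pyRange_one).1 hi
  rw [pvFoldlStr]
  congr 1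
  rw [pvSetMap n i hmem.1]
  refine congrArg (PySem.Str.join "") ?_
  apply List.map_congr_left
  intro j hj
  by_cases hij : i = j
  · simp [hij, String.append_assoc]
  · simp [hij, String.append_assoc]
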